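-- pv_equiv track=rewrite | github.com/icefoxtail/AP------ | build_db.py | count_top_level_objects_in_array
-- ===== SOURCE A (Python) =====
-- def count_top_level_objects_in_array(array_text):
--     depth_brace = 0
--     depth_bracket = 0
--     count = 0
--
--     in_single = False
--     in_double = False
--     in_backtick = False
--     in_line_comment = False
--     in_block_comment = False
--     escape = False
--
--     for i, ch in enumerate(array_text):
--         nxt = array_text[i + 1] if i + 1 < len(array_text) else ''
--
--         if in_line_comment:
--             if ch == '\n':
--                 in_line_comment = False
--             continue
--         if in_block_comment:
--             if ch == '*' and nxt == '/':
--                 in_block_comment = False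
--             continue
--         if in_single:
--             if escape:
--                 escape = False
--             elif ch == '\\':
--                 escape = True
--             elif ch == "'":
--                 in_single = False
--             continue
--         if in_double:
--             if escape:
--                 escape = False
--             elif ch == '\\':
--                 escape = True
--             elif ch == '"':
--                 in_double = False
--             continue
--         if in_backtick:
--             if escape:
--                 escape = False
--             elif ch == '\\':
--                 escape = True
--             elif ch == '`':
--                 in_backtick = False
--             continue
--
--         if ch == '/' and nxt == '/':
--             in_line_comment = True
--             continue
--         if ch == '/' and nxt == '*':
--             in_block_comment = True
--             continue
--         if ch == "'":
--             in_single = True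
--             continue
--         if ch == '"':
--             in_double = True
--             continue
--         if ch == '`':
--             in_backtick = True
--             continue
--
--         if ch == '[':
--             depth_bracket += 1
--             continue
--         if ch == ']':
--             depth_bracket -= 1
--             continue
--
--         if ch == '{':
--             if depth_bracket == 1 and depth_brace == 0:
--                 count += 1
--             depth_brace += 1
--             continue
--         if ch == '}':
--             depth_brace -= 1
--             continue
--
--     return count
-- ===== SOURCE B (Python) =====
-- def count_top_level_objects_in_array(array_text):
--     s = array_text
--     n = len(s)
--     depth_brace = 0
--     depth_bracket = 0
--     count = 0
--     i = 0
--     while i < n: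
--         ch = s[i]
--         if ch == "'" or ch == '"' or ch == '`':
--             j = i + 1
--             while j < n:
--                 if s[j] == '\\':
--                     j += 2
--                 elif s[j] == ch:
--                     break
--                 else:
--                     j += 1
--             i = j + 1
--         elif ch == '/' and i + 1 < n and s[i + 1] == '/':
--             j = s.find('\n', i + 2)
--             i = n if j == -1 else j + 1
--         elif ch == '/' and i + 1 < n and s[i + 1] == '*':
--             # scan for the closing '*/' starting at the '*' of '/*' (so '/*/' closes
--             # immediately); resume at the '/' of '*/', which the lexer re-examines
--             j = i + 1
--             while j < n and not (s[j] == '*' and j + 1 < n and s[j + 1] == '/'):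
--                 j += 1
--             i = n if j >= n else j + 1
--         else:
--             if ch == '[':
--                 depth_bracket += 1
--             elif ch == ']':
--                 depth_bracket -= 1
--             elif ch == '{':
--                 if depth_bracket == 1 and depth_brace == 0:
--                     count += 1
--                 depth_brace += 1
--             elif ch == '}':
--                 depth_brace -= 1
--             i += 1
--     return count
-- ===== Notes on version B (the rewrite author's own statement) =====
-- stated objective: alternative
-- what changed: Replaces A's per-character state machine threading six boolean flags across every iteration by an explicit-index while loop whose inner loops consume a whole quoted string, line comment or block comment at once, leaving only the bracket/brace depth logic in the outer loop.
import Mathlib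
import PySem

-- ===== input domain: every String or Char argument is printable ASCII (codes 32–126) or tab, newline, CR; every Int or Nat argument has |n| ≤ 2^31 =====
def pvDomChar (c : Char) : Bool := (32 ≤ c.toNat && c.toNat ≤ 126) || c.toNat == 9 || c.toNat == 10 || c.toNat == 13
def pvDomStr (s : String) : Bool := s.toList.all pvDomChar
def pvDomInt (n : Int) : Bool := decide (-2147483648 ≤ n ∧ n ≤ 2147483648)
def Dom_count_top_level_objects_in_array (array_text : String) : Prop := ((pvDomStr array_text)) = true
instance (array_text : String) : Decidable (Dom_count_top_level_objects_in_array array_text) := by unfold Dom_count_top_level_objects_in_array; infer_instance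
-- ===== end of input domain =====

-- B replaces A's per-character boolean flag machine by an index-free token scanner:
-- inner loops consume a whole string literal or comment at once (objective: alternative decomposition).

-- ===== PORT A =====
-- state machine: one step per character, nxt = lookahead (rest.head?, none for Python '')
def pvRunA (l : List Char) (depth_brace depth_bracket count : Int)
    (in_single in_double in_backtick in_line_comment in_block_comment escape : Bool) : Int :=
  match l with
  | [] => count
  | ch :: rest =>
    let nxt : Option Char := rest.head?
    if in_line_comment then
      if ch == '\n' then pvRunA rest depth_brace depth_bracket count in_single in_double in_backtick false in_block_comment escape
      else pvRunA rest depth_brace depth_bracket count in_single in_double in_backtick in_line_comment in_block_comment escape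
    else if in_block_comment then
      if ch == '*' && nxt == some '/' then pvRunA rest depth_brace depth_bracket count in_single in_double in_backtick in_line_comment false escape
      else pvRunA rest depth_brace depth_bracket count in_single in_double in_backtick in_line_comment in_block_comment escape
    else if in_single then
      if escape then pvRunA rest depth_brace depth_bracket count in_single in_double in_backtick in_line_comment in_block_comment false
      else if ch == '\\' then pvRunA rest depth_brace depth_bracket count in_single in_double in_backtick in_line_comment in_block_comment true
      else if ch == '\'' then pvRunA rest depth_brace depth_bracket count false in_double in_backtick in_line_comment in_block_comment escape
      else pvRunA rest depth_brace depth_bracket count in_single in_double in_backtick in_line_comment in_block_comment escape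
    else if in_double then
      if escape then pvRunA rest depth_brace depth_bracket count in_single in_double in_backtick in_line_comment in_block_comment false
      else if ch == '\\' then pvRunA rest depth_brace depth_bracket count in_single in_double in_backtick in_line_comment in_block_comment true
      else if ch == '"' then pvRunA rest depth_brace depth_bracket count in_single false in_backtick in_line_comment in_block_comment escape
      else pvRunA rest depth_brace depth_bracket count in_single in_double in_backtick in_line_comment in_block_comment escape
    else if in_backtick then
      if escape then pvRunA rest depth_brace depth_bracket count in_single in_double in_backtick in_line_comment in_block_comment false
      else if ch == '\\' then pvRunA rest depth_brace depth_bracket count in_single in_double in_backtick in_line_comment in_block_comment true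
      else if ch == '`' then pvRunA rest depth_brace depth_bracket count in_single in_double false in_line_comment in_block_comment escape
      else pvRunA rest depth_brace depth_bracket count in_single in_double in_backtick in_line_comment in_block_comment escape
    else if ch == '/' && nxt == some '/' then
      pvRunA rest depth_brace depth_bracket count in_single in_double in_backtick true in_block_comment escape
    else if ch == '/' && nxt == some '*' then
      pvRunA rest depth_brace depth_bracket count in_single in_double in_backtick in_line_comment true escape
    else if ch == '\'' then pvRunA rest depth_brace depth_bracket count true in_double in_backtick in_line_comment in_block_comment escape
    else if ch == '"' then pvRunA rest depth_brace depth_bracket count in_single true in_backtick in_line_comment in_block_comment escape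
    else if ch == '`' then pvRunA rest depth_brace depth_bracket count in_single in_double true in_line_comment in_block_comment escape
    else if ch == '[' then pvRunA rest depth_brace (depth_bracket + 1) count in_single in_double in_backtick in_line_comment in_block_comment escape
    else if ch == ']' then pvRunA rest depth_brace (depth_bracket - 1) count in_single in_double in_backtick in_line_comment in_block_comment escape
    else if ch == '{' then
      pvRunA rest (depth_brace + 1) depth_bracket
        (if depth_bracket == 1 && depth_brace == 0 then count + 1 else count)
        in_single in_double in_backtick in_line_comment in_block_comment escape
    else if ch == '}' then pvRunA rest (depth_brace - 1) depth_bracket count in_single in_double in_backtick in_line_comment in_block_comment escape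
    else pvRunA rest depth_brace depth_bracket count in_single in_double in_backtick in_line_comment in_block_comment escape

def count_top_level_objects_in_array (array_text : String) : Int :=
  pvRunA array_text.toList 0 0 0 false false false false false false

-- ===== PORT B =====
-- consume a quoted literal: '\\' skips the next char; the closing quote ends the token
def pvSkipStr (q : Char) : List Char → List Char
  | [] => []
  | c :: rest =>
    if c == '\\' then
      match rest with
      | [] => []
      | _ :: r2 => pvSkipStr q r2
    else if c == q then rest
    else pvSkipStr q rest

-- consume a '//' comment up to and including the newline
def pvSkipLine : List Char → List Char
  | [] => []
  | c :: rest => if c == '\n' then rest else pvSkipLine rest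

-- consume a '/*' comment; resume at the '/' of the closing '*/'
def pvSkipBlock : List Char → List Char
  | [] => []
  | c :: rest => if c == '*' && rest.head? == some '/' then rest else pvSkipBlock rest

theorem pvSkipStr_length_le (q : Char) (l : List Char) : (pvSkipStr q l).length ≤ l.length := by
  induction l using pvSkipStr.induct q with
  | case1 => simp [pvSkipStr]
  | case2 c h => obtain rfl := eq_of_beq h; rw [pvSkipStr.eq_def]; simp
  | case3 c h d r2 ih => obtain rfl := eq_of_beq h; rw [pvSkipStr.eq_def]; simp; omega
  | case4 c rest h1 h2 => obtain rfl := eq_of_beq h2; rw [pvSkipStr.eq_def]; simp [h1]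
  | case5 c rest h1 h2 ih => rw [pvSkipStr.eq_def]; simp [h1, h2]; omega

theorem pvSkipLine_length_le (l : List Char) : (pvSkipLine l).length ≤ l.length := by
  induction l using pvSkipLine.induct with
  | case1 => simp [pvSkipLine]
  | case2 c rest h => rw [pvSkipLine.eq_def]; simp [h]
  | case3 c rest h ih => rw [pvSkipLine.eq_def]; simp [h]; omega

theorem pvSkipBlock_length_le (l : List Char) : (pvSkipBlock l).length ≤ l.length := by
  induction l using pvSkipBlock.induct with
  | case1 => simp [pvSkipBlock]
  | case2 c rest h => rw [pvSkipBlock.eq_def]; simp [h]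
  | case3 c rest h ih => rw [pvSkipBlock.eq_def]; simp [h]; omega

def pvRunB : List Char → Int → Int → Int → Int
  | [], _, _, count => count
  | ch :: rest, depth_brace, depth_bracket, count =>
    if ch == '\'' || ch == '"' || ch == '`' then
      pvRunB (pvSkipStr ch rest) depth_brace depth_bracket count
    else if ch == '/' && rest.head? == some '/' then
      pvRunB (pvSkipLine rest.tail) depth_brace depth_bracket count
    else if ch == '/' && rest.head? == some '*' then
      pvRunB (pvSkipBlock rest) depth_brace depth_bracket count
    else if ch == '[' then pvRunB rest depth_brace (depth_bracket + 1) count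
    else if ch == ']' then pvRunB rest depth_brace (depth_bracket - 1) count
    else if ch == '{' then
      pvRunB rest (depth_brace + 1) depth_bracket
        (if depth_bracket == 1 && depth_brace == 0 then count + 1 else count)
    else if ch == '}' then pvRunB rest (depth_brace - 1) depth_bracket count
    else pvRunB rest depth_brace depth_bracket count
  termination_by l _ _ _ => l.length
  decreasing_by
  · have := pvSkipStr_length_le ch rest; simp; omega
  · have := pvSkipLine_length_le rest.tail
    cases rest <;> simp_all <;> omega
  · have := pvSkipBlock_length_le rest; simp; omega
  all_goals simp

def count_top_level_objects_in_array_alt (array_text : String) : Int :=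
  pvRunB array_text.toList 0 0 0

-- ===== PRECONDITION & SPEC =====
def Spec_count_top_level_objects_in_array (array_text : String) (out : Int) : Prop := out = count_top_level_objects_in_array_alt array_text
instance (array_text : String) (out : Int) : Decidable (Spec_count_top_level_objects_in_array array_text out) := by unfold Spec_count_top_level_objects_in_array; infer_instance

-- ===== CLAIM (what is proved, stated in full; the proofs are below) =====
def Claim_equal_count_top_level_objects_in_array : Prop := ∀ (array_text : String), Dom_count_top_level_objects_in_array array_text → Spec_count_top_level_objects_in_array array_text (count_top_level_objects_in_array array_text)

-- ===== LEMMAS AND PROOFS =====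

theorem pvA_line (l : List Char) (db dk cnt : Int) :
    pvRunA l db dk cnt false false false true false false
      = pvRunA (pvSkipLine l) db dk cnt false false false false false false := by
  induction l with
  | nil => simp [pvRunA, pvSkipLine]
  | cons c rest ih =>
    by_cases h : c = '\n' <;> simp [pvRunA, pvSkipLine, h, ih]

theorem pvA_block (l : List Char) (db dk cnt : Int) :
    pvRunA l db dk cnt false false false false true false
      = pvRunA (pvSkipBlock l) db dk cnt false false false false false false := by
  induction l with
  | nil => simp [pvRunA, pvSkipBlock]
  | cons c rest ih =>
    by_cases h : (c == '*' && rest.head? == some '/') = true <;>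
      simp [pvRunA, pvSkipBlock, h, ih]

theorem pvA_single (l : List Char) (db dk cnt : Int) :
    pvRunA l db dk cnt true false false false false false
      = pvRunA (pvSkipStr '\'' l) db dk cnt false false false false false false := by
  induction l using pvSkipStr.induct '\'' with
  | case1 => simp [pvRunA, pvSkipStr]
  | case2 c h => obtain rfl := eq_of_beq h; rw [pvSkipStr.eq_def]; simp [pvRunA]
  | case3 c h d r2 ih => obtain rfl := eq_of_beq h; rw [pvSkipStr.eq_def]; simp [pvRunA, ih]
  | case4 c rest h1 h2 => obtain rfl := eq_of_beq h2; rw [pvSkipStr.eq_def]; simp [pvRunA, h1]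
  | case5 c rest h1 h2 ih => rw [pvSkipStr.eq_def]; simp [pvRunA, h1, h2, ih]

theorem pvA_double (l : List Char) (db dk cnt : Int) :
    pvRunA l db dk cnt false true false false false false
      = pvRunA (pvSkipStr '"' l) db dk cnt false false false false false false := by
  induction l using pvSkipStr.induct '"' with
  | case1 => simp [pvRunA, pvSkipStr]
  | case2 c h => obtain rfl := eq_of_beq h; rw [pvSkipStr.eq_def]; simp [pvRunA]
  | case3 c h d r2 ih => obtain rfl := eq_of_beq h; rw [pvSkipStr.eq_def]; simp [pvRunA, ih]
  | case4 c rest h1 h2 => obtain rfl := eq_of_beq h2; rw [pvSkipStr.eq_def]; simp [pvRunA, h1]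
  | case5 c rest h1 h2 ih => rw [pvSkipStr.eq_def]; simp [pvRunA, h1, h2, ih]

theorem pvA_backtick (l : List Char) (db dk cnt : Int) :
    pvRunA l db dk cnt false false true false false false
      = pvRunA (pvSkipStr '`' l) db dk cnt false false false false false false := by
  induction l using pvSkipStr.induct '`' with
  | case1 => simp [pvRunA, pvSkipStr]
  | case2 c h => obtain rfl := eq_of_beq h; rw [pvSkipStr.eq_def]; simp [pvRunA]
  | case3 c h d r2 ih => obtain rfl := eq_of_beq h; rw [pvSkipStr.eq_def]; simp [pvRunA, ih]
  | case4 c rest h1 h2 => obtain rfl := eq_of_beq h2; rw [pvSkipStr.eq_def]; simp [pvRunA, h1]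
  | case5 c rest h1 h2 ih => rw [pvSkipStr.eq_def]; simp [pvRunA, h1, h2, ih]

theorem pvMain (l : List Char) (db dk cnt : Int) :
    pvRunA l db dk cnt false false false false false false = pvRunB l db dk cnt := by
  induction l, db, dk, cnt using pvRunB.induct with
  | case1 db dk cnt => simp [pvRunA, pvRunB]
  | case2 ch rest db dk cnt hq ih =>
    rcases Bool.or_eq_true_iff.mp hq with hq' | hq'
    · rcases Bool.or_eq_true_iff.mp hq' with h | h <;> obtain rfl := eq_of_beq h <;>
        simp_all [pvRunA, pvRunB, pvA_single, pvA_double]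
    · obtain rfl := eq_of_beq hq'
      simp_all [pvRunA, pvRunB, pvA_backtick]
  | case3 ch rest db dk cnt hq hl ih =>
    obtain rfl := eq_of_beq (Bool.and_eq_true_iff.mp hl).1
    have hh := (Bool.and_eq_true_iff.mp hl).2
    cases rest with
    | nil => simp at hh
    | cons c r2 =>
      obtain rfl : c = '/' := by simpa using hh
      simp_all [pvRunA, pvRunB, pvA_line, pvSkipLine]
  | case4 ch rest db dk cnt hq hl hb ih =>
    obtain rfl := eq_of_beq (Bool.and_eq_true_iff.mp hb).1
    simp_all [pvRunA, pvRunB, pvA_block]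
  | case5 ch rest db dk cnt hq hl hb h ih =>
    obtain rfl := eq_of_beq h; simp_all [pvRunA, pvRunB]
  | case6 ch rest db dk cnt hq hl hb h1 h2 ih =>
    obtain rfl := eq_of_beq h2; simp_all [pvRunA, pvRunB]
  | case7 ch rest db dk cnt hq hl hb h1 h2 h3 ih =>
    obtain rfl := eq_of_beq h3; simp_all [pvRunA, pvRunB]
  | case8 ch rest db dk cnt hq hl hb h1 h2 h3 h4 ih =>
    obtain rfl := eq_of_beq h4; simp_all [pvRunA, pvRunB]
  | case9 ch rest db dk cnt hq hl hb h1 h2 h3 h4 ih =>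
    simp_all [pvRunA, pvRunB]
    split_ifs <;> simp_all

-- ===== VERDICT (by name: the statement is the Claim_ definition above) =====
theorem count_top_level_objects_in_array_spec : Claim_equal_count_top_level_objects_in_array := by
  intro s _
  unfold Spec_count_top_level_objects_in_array count_top_level_objects_in_array count_top_level_objects_in_array_alt
  exact pvMain s.toList 0 0 0
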